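-- pv_equiv track=rewrite | github.com/alphagov/govuk-shielded-vulnerable-people-service | vulnerable_people_form/integrations/postcode_lookup_helper.py | property_identifier
-- ===== SOURCE A (Python) =====
-- def property_identifier(start_number, start_suffix, end_number, end_suffix, text_value):
--     def number_suffix(a, b):
--         return f'{a}{b}' if b else f'{a}'
--
--     if text_value:
--         number_identifier = property_identifier(start_number, start_suffix, end_number, end_suffix, None)
--         return f'{text_value}, {number_identifier}' if number_identifier else text_value
--     elif end_number:
--         return f'{number_suffix(start_number, start_suffix)}-{number_suffix(end_number, end_suffix)}'
--     elif start_number: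
--         return number_suffix(start_number, start_suffix)
--     else:
--         return None
-- ===== SOURCE B (Python) =====
-- def property_identifier(start_number, start_suffix, end_number, end_suffix, text_value):
--     pairs = [(start_number, start_suffix), (end_number, end_suffix)]
--     take = 2 if end_number else (1 if start_number else 0)
--     number = '-'.join('{}{}'.format(n, s if s else '') for n, s in pairs[:take]) or None
--     return ', '.join(v for v in (text_value, number) if v) or None
-- ===== Notes on version B (the rewrite author's own statement) =====
-- stated objective: alternative
-- what changed: Replaces A's branch-per-case string building with a self-recursive re-entry by a data-driven join pipeline: take a prefix of the [(start,start_sfx),(end,end_sfx)] pair list, '-'.join the formatted pairs, then ', '.join the truthy segments of (text_value, number).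
import Mathlib
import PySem

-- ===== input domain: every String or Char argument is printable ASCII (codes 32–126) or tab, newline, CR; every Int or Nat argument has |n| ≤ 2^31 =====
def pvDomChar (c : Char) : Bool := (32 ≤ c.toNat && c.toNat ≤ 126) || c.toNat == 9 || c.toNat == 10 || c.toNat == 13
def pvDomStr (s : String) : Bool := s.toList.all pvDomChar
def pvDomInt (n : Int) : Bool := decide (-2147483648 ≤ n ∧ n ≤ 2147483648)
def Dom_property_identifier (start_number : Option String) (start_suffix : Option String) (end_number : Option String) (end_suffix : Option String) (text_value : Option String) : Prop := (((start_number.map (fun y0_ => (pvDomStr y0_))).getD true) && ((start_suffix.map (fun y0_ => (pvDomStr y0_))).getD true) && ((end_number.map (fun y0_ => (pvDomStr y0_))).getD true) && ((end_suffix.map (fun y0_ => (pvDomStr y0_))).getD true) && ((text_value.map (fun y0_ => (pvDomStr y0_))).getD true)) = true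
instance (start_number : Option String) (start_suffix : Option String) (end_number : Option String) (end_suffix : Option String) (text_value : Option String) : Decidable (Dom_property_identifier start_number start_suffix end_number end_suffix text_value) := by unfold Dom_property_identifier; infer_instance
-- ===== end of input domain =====

-- B replaces A's branch-per-case string building (with a self-recursive re-entry) by a
-- segments-and-join pipeline: take a prefix of the (number,suffix) pair list, join with '-',
-- then join the truthy segments with ', '; return values agree everywhere (objective: alternative).

-- ===== PORT A =====
-- Python truthiness of an Optional[str]: None and "" are falsy.
def pvTruthy (o : Option String) : Bool :=
  match o with
  | none => false
  | some s => !(s.toList.isEmpty)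

-- f'{o}' on an Optional[str]: None renders as "None".
def pvFmt (o : Option String) : String :=
  match o with
  | none => "None"
  | some s => s

-- inner helper number_suffix of A
def numberSuffix (a b : Option String) : String :=
  if pvTruthy b then pvFmt a ++ pvFmt b else pvFmt a

-- literal transliteration of A, including the self-recursive call with text_value := none
def property_identifier (start_number : Option String) (start_suffix : Option String) (end_number : Option String) (end_suffix : Option String) (text_value : Option String) : Option String :=
  if pvTruthy text_value then
    let number_identifier := property_identifier start_number start_suffix end_number end_suffix none
    if pvTruthy number_identifier then
      some (pvFmt text_value ++ ", " ++ pvFmt number_identifier)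
    else text_value
  else if pvTruthy end_number then
    some (numberSuffix start_number start_suffix ++ "-" ++ numberSuffix end_number end_suffix)
  else if pvTruthy start_number then
    some (numberSuffix start_number start_suffix)
  else
    none
termination_by (if pvTruthy text_value then 1 else 0)
decreasing_by simp_all [pvTruthy]

-- ===== PORT B =====
-- '{}{}'.format(n, s if s else '') in Source B
def pvFmtPair (p : Option String × Option String) : String :=
  pvFmt p.1 ++ pvFmt (if pvTruthy p.2 then p.2 else some "")

-- 's or None' in Source B: an empty string becomes None
def pvOrNone (s : String) : Option String :=
  if s.toList.isEmpty then none else some s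

-- literal transliteration of Source B: prefix of the pair list, join with '-', filter truthy
-- segments, join with ', '
def property_identifier_alt (start_number : Option String) (start_suffix : Option String) (end_number : Option String) (end_suffix : Option String) (text_value : Option String) : Option String :=
  let pairs : List (Option String × Option String) := [(start_number, start_suffix), (end_number, end_suffix)]
  let take : Nat := if pvTruthy end_number then 2 else if pvTruthy start_number then 1 else 0
  let number : Option String := pvOrNone (PySem.Str.join "-" ((pairs.take take).map pvFmtPair))
  pvOrNone (PySem.Str.join ", " (([text_value, number].filter pvTruthy).map pvFmt))

-- ===== PRECONDITION & SPEC =====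
def Spec_property_identifier (start_number : Option String) (start_suffix : Option String) (end_number : Option String) (end_suffix : Option String) (text_value : Option String) (out : Option String) : Prop := out = property_identifier_alt start_number start_suffix end_number end_suffix text_value
instance (start_number : Option String) (start_suffix : Option String) (end_number : Option String) (end_suffix : Option String) (text_value : Option String) (out : Option String) : Decidable (Spec_property_identifier start_number start_suffix end_number end_suffix text_value out) := by unfold Spec_property_identifier; infer_instance

-- ===== CLAIM =====
def Claim_equal_property_identifier : Prop := ∀ (start_number : Option String) (start_suffix : Option String) (end_number : Option String) (end_suffix : Option String) (text_value : Option String), Dom_property_identifier start_number start_suffix end_number end_suffix text_value → Spec_property_identifier start_number start_suffix end_number end_suffix text_value (property_identifier start_number start_suffix end_number end_suffix text_value)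

-- ===== LEMMAS AND PROOFS =====
theorem join_nil_str (sep : String) : PySem.Str.join sep [] = "" := rfl

theorem join_one (sep a : String) : PySem.Str.join sep [a] = a := by
  simp [PySem.Str.join]

theorem join_two (sep a b : String) : PySem.Str.join sep [a, b] = a ++ sep ++ b := by
  have h : (PySem.Str.join sep [a, b]).toList = (a ++ sep ++ b).toList := by
    simp [PySem.Str.join, PySem.Chars.join_cons_cons, PySem.Chars.join_singleton,
      ]
  exact String.toList_injective h

theorem fmtPair_eq (n s : Option String) : pvFmtPair (n, s) = numberSuffix n s := by
  by_cases h : pvTruthy s = true <;> simp [pvFmtPair, numberSuffix, h, pvFmt]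

theorem pvOrNone_of_ne {s : String} (h : s ≠ "") : pvOrNone s = some s := by
  simp only [pvOrNone, List.isEmpty_iff, String.toList_eq_nil_iff, if_neg h]

theorem truthy_ne {s : String} (h : pvTruthy (some s) = true) : s ≠ "" := by
  intro he; subst he; simp [pvTruthy] at h

theorem append_ne_left {a : String} (b : String) (h : a ≠ "") : a ++ b ≠ "" := by
  intro he
  have := congrArg String.toList he
  simp only [String.toList_append, String.toList_empty, List.append_eq_nil_iff,
    String.toList_eq_nil_iff] at this
  exact h this.1

theorem mid_dash_ne (x y : String) : x ++ "-" ++ y ≠ "" := by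
  intro he
  have := congrArg String.toList he
  simp at this

theorem numberSuffix_ne {sn : Option String} (ss : Option String)
    (h : pvTruthy sn = true) : numberSuffix sn ss ≠ "" := by
  cases sn with
  | none => simp [pvTruthy] at h
  | some s =>
    unfold numberSuffix
    by_cases ht : pvTruthy ss = true
    · simpa [ht, pvFmt] using append_ne_left (pvFmt ss) (truthy_ne h)
    · simpa [ht, pvFmt] using truthy_ne h

-- the number identifier computed by B, case by case
theorem number_eq (sn ss en es : Option String) :
    pvOrNone (PySem.Str.join "-" (([(sn, ss), (en, es)].take
        (if pvTruthy en then 2 else if pvTruthy sn then 1 else 0)).map pvFmtPair))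
      = property_identifier sn ss en es none := by
  rw [property_identifier]
  have hnone : pvTruthy none = false := rfl
  simp only [hnone, Bool.false_eq_true, if_false]
  by_cases he : pvTruthy en = true
  · simp only [he, if_true, List.take_succ_cons, List.take_nil, List.map,
      join_two, fmtPair_eq]
    rw [pvOrNone_of_ne (mid_dash_ne _ _)]
  · simp only [he, Bool.false_eq_true, if_false]
    by_cases hs : pvTruthy sn = true
    · simp only [hs, if_true, List.take_succ_cons, List.take_zero, List.map, join_one,
        fmtPair_eq]
      rw [pvOrNone_of_ne (numberSuffix_ne ss hs)]
    · simp only [hs, Bool.false_eq_true, if_false, List.take_zero, List.map, join_nil_str]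
      rfl

-- the final ', '-join, case by case on text_value and the number identifier
theorem final_join (tv number : Option String)
    (hnum : pvTruthy number = true ∨ number = none) :
    pvOrNone (PySem.Str.join ", " (([tv, number].filter pvTruthy).map pvFmt))
      = if pvTruthy tv then
          (if pvTruthy number then some (pvFmt tv ++ ", " ++ pvFmt number) else tv)
        else number := by
  by_cases htv : pvTruthy tv = true
  · by_cases hn : pvTruthy number = true
    · simp only [List.filter, htv, hn, List.map, join_two, if_true]
      rw [pvOrNone_of_ne]
      intro he
      have := congrArg String.toList he
      simp at this
    · simp only [List.filter, htv, hn, Bool.false_eq_true, List.map, join_one]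
      obtain ⟨t, rfl⟩ : ∃ t, tv = some t := by cases tv with
        | none => simp [pvTruthy] at htv
        | some t => exact ⟨t, rfl⟩
      rw [show pvFmt (some t) = t from rfl, pvOrNone_of_ne (truthy_ne htv)]
      simp [htv]
  · have htv' : pvTruthy tv = false := by simpa using htv
    have hfil : [tv, number].filter pvTruthy = [number].filter pvTruthy := by
      simp [List.filter, htv']
    rw [hfil]
    by_cases hn : pvTruthy number = true
    · obtain ⟨m, rfl⟩ : ∃ m, number = some m := by cases number with
        | none => simp [pvTruthy] at hn
        | some m => exact ⟨m, rfl⟩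
      simp only [List.filter, hn, List.map, join_one]
      rw [show pvFmt (some m) = m from rfl, pvOrNone_of_ne (truthy_ne hn)]
      simp [htv']
    · have h0 : number = none := by
        rcases hnum with h | h
        · exact absurd h hn
        · exact h
      subst h0
      have h1 : pvOrNone (PySem.Str.join ", " (([(none : Option String)].filter
          pvTruthy).map pvFmt)) = none := rfl
      rw [h1]
      simp [htv']

theorem pvOrNone_cases (s : String) : pvTruthy (pvOrNone s) = true ∨ pvOrNone s = none := by
  by_cases h : s = ""
  · exact Or.inr (by simp [pvOrNone, h])
  · rw [pvOrNone_of_ne h]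
    exact Or.inl (by simpa [pvTruthy, List.isEmpty_iff, String.toList_eq_nil_iff] using h)

-- ===== VERDICT =====
theorem property_identifier_spec : Claim_equal_property_identifier := by
  intro sn ss en es tv _
  unfold Spec_property_identifier
  have halt : property_identifier_alt sn ss en es tv
      = pvOrNone (PySem.Str.join ", "
          (([tv, pvOrNone (PySem.Str.join "-" (([(sn, ss), (en, es)].take
              (if pvTruthy en then 2 else if pvTruthy sn then 1 else 0)).map pvFmtPair))].filter
                pvTruthy).map pvFmt)) := rfl
  rw [halt, final_join _ _ (by rw [number_eq]; exact (number_eq sn ss en es ▸ pvOrNone_cases _)),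
    number_eq]
  by_cases htv : pvTruthy tv = true
  · rw [property_identifier]
    simp [htv]
  · have htv' : pvTruthy tv = false := by simpa using htv
    rw [property_identifier]
    simp only [htv', Bool.false_eq_true, if_false]
    rw [property_identifier]
    simp [pvTruthy]
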